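-- pv_equiv track=rewrite | github.com/tehw0lf/wlgen | wlgen/benchmarks/benchmark.py | create_charset
-- ===== SOURCE A (Python) =====
-- from typing import Callable, Dict
--
-- def create_charset(
--     positions: int, chars_per_position: int, base: str = None
-- ) -> Dict[int, str]:
--     """
--     Create a test charset
--
--     Args:
--         positions: Number of positions in the wordlist
--         chars_per_position: Number of characters per position
--         base: Base character set to use (default: alphanumeric)
--     """
--     if base is None:
--         base = "abcdefghijklmnopqrstuvwxyzABCDEFGHIJKLMNOPQRSTUVWXYZ0123456789"
--
--     charset = {}
--     for i in range(positions):
--         start_idx = (i * chars_per_position) % len(base)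
--         charset[i] = base[start_idx : start_idx + chars_per_position]
--         if len(charset[i]) < chars_per_position:
--             # Wrap around if needed
--             charset[i] += base[: chars_per_position - len(charset[i])]
--
--     return charset
-- ===== SOURCE B (Python) =====
-- _DEFAULT = "abcdefghijklmnopqrstuvwxyzABCDEFGHIJKLMNOPQRSTUVWXYZ0123456789"
--
--
-- def create_charset(positions, chars_per_position, base=None):
--     if base is None:
--         base = _DEFAULT
--     if positions <= 0:
--         return {}
--     n = len(base)
--     # The start offsets (i * chars_per_position) % n repeat with period
--     # n // gcd(n, chars_per_position): precompute ONE period of substrings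
--     # (incrementally advancing the start), then index it by i % period.
--     a, b = n, abs(chars_per_position)
--     while b:
--         a, b = b, a % b
--     period = n // a
--     doubled = base + base
--     chunks = []
--     start = 0
--     for _ in range(period):
--         chunks.append(doubled[start : start + chars_per_position])
--         start = (start + chars_per_position) % n
--     return {i: chunks[i % period] for i in range(positions)}
-- ===== Notes on version B (the rewrite author's own statement) =====
-- stated objective: alternative
-- what changed: B exploits that the start offsets (i*k) % len(base) are periodic with period len(base)//gcd(len(base),k): it precomputes one period of wrapped substrings (advancing the start incrementally, slicing a doubled base) and then fills the dict by indexing that table with i % period, instead of A's per-position slice with a length-check-and-wrap append.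
-- outside the precondition, e.g. on create_charset(1, -2, 'abc'): A returns {0: 'a'}, B returns {0: 'abca'}
import Mathlib
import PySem

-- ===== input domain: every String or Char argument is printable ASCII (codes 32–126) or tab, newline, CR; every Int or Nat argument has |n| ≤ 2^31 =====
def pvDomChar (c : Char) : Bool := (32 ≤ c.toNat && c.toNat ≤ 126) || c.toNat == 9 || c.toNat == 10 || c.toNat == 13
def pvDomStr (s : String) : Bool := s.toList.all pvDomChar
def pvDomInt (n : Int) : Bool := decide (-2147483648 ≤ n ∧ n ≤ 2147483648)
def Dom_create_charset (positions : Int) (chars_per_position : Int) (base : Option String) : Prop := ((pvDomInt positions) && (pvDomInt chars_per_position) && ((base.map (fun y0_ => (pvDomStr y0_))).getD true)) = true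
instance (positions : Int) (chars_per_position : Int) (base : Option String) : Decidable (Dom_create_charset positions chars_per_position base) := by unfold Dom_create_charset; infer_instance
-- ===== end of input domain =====

-- B precomputes one period (len // gcd(len, k)) of wrapped substrings and fills the dict by
-- indexing that table with i % period, replacing A's per-position slice-and-wrap branch.


-- ===== PORT A =====
def pvDefaultBase : String := "abcdefghijklmnopqrstuvwxyzABCDEFGHIJKLMNOPQRSTUVWXYZ0123456789"

-- the string A stores for position i: base[start:start+cpp], wrapped by the length check
def pvWrapA (b : List Char) (cpp i : Int) : List Char :=
  let start := PySem.Int.mod (i * cpp) (b.length : Int)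
  let s := PySem.List.slice b (some start) (some (start + cpp))
  if (s.length : Int) < cpp then s ++ PySem.List.slice b none (some (cpp - (s.length : Int))) else s

def create_charset (positions : Int) (chars_per_position : Int) (base : Option String) : List (Int × String) :=
  let b := (base.getD pvDefaultBase).toList
  ((PySem.List.pyRange 0 positions 1).foldl
      (fun (d : PySem.Dict Int String) i => d.insert i (String.ofList (pvWrapA b chars_per_position i)))
      PySem.Dict.empty).items

-- ===== PORT B =====
-- B's hand-written Euclid loop 'while b: a, b = b, a % b'
def pvGcdLoop (a b : Nat) : Nat :=
  if h : b = 0 then a else pvGcdLoop b (a % b)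
termination_by b
decreasing_by exact Nat.mod_lt _ (Nat.pos_of_ne_zero h)

def create_charset_alt (positions : Int) (chars_per_position : Int) (base : Option String) : List (Int × String) :=
  let b := (base.getD pvDefaultBase).toList
  if positions ≤ 0 then [] else
    let n : Nat := b.length
    let period : Nat := n / pvGcdLoop n chars_per_position.natAbs
    let doubled := b ++ b
    let chunks : List String :=
      ((List.range period).foldl
        (fun (st : List String × Int) _ =>
          (st.1 ++ [String.ofList (PySem.List.slice doubled (some st.2) (some (st.2 + chars_per_position)))],
           PySem.Int.mod (st.2 + chars_per_position) (n : Int)))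
        ([], (0 : Int))).1
    -- chunks[i % period]: under Pre_ the index is in range (0 ≤ i % period < period = len chunks),
    -- so the .getD default is unreachable; it only makes the port total
    (PySem.List.pyRange 0 positions 1).foldl
      (fun acc i => acc ++ [(i, (PySem.List.pyGet? chunks (PySem.Int.mod i (period : Int))).getD "")]) []

-- ===== PRECONDITION & SPEC =====
-- Pre_ excludes (a) empty base with positions ≥ 1, where A raises ZeroDivisionError, and
-- (b) negative chars_per_position with positions ≥ 1, a corner no caller would specify, where
-- Python's negative-stop slice rule gives A and B accidental differing substrings of base resp.
-- the doubled base.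
def Pre_create_charset (positions : Int) (chars_per_position : Int) (base : Option String) : Prop :=
  positions ≤ 0 ∨ (0 ≤ chars_per_position ∧ base ≠ some "")
instance (positions : Int) (chars_per_position : Int) (base : Option String) : Decidable (Pre_create_charset positions chars_per_position base) := by unfold Pre_create_charset; infer_instance

def pvWitness_create_charset : Int × Int × Option String := (2, 3, some "ab")

def Spec_create_charset (positions : Int) (chars_per_position : Int) (base : Option String) (out : List (Int × String)) : Prop := out = create_charset_alt positions chars_per_position base
instance (positions : Int) (chars_per_position : Int) (base : Option String) (out : List (Int × String)) : Decidable (Spec_create_charset positions chars_per_position base out) := by unfold Spec_create_charset; infer_instance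

-- ===== CLAIM (what is proved, stated in full; the proofs are below) =====
def Claim_equal_create_charset : Prop := ∀ (positions : Int) (chars_per_position : Int) (base : Option String), Dom_create_charset positions chars_per_position base → Pre_create_charset positions chars_per_position base → Spec_create_charset positions chars_per_position base (create_charset positions chars_per_position base)

-- ===== LEMMAS AND PROOFS =====

-- B's Euclid loop is gcd
lemma pvGcdLoop_eq (a b : Nat) : pvGcdLoop a b = Nat.gcd b a := by
  fun_induction pvGcdLoop a b with
  | case1 a => simp
  | case2 a b h ih => rw [ih, Nat.gcd_rec b a, Nat.gcd_comm]

-- the string B's table stores for a start offset: one slice of the doubled base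
def pvWrapB (b : List Char) (cpp i : Int) : List Char :=
  let start := PySem.Int.mod (i * cpp) (b.length : Int)
  PySem.List.slice (b ++ b) (some start) (some (start + cpp))

-- wrap-by-append vs one slice of the doubled list, stated over Nat start/length
lemma pvWrap_core (b : List Char) (j c : Nat) (hj : j < b.length) :
    (if (((b.drop j).take c).length : Int) < (c : Int)
     then (b.drop j).take c ++ PySem.List.slice b none (some ((c : Int) - (((b.drop j).take c).length : Int)))
     else (b.drop j).take c)
    = ((b ++ b).drop j).take c := by
  have hlen : ((b.drop j).take c).length = min c (b.length - j) := by simp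
  rw [List.drop_append]
  have hz : j - b.length = 0 := by omega
  rw [hz, List.drop_zero, List.take_append]
  have hdl : (b.drop j).length = b.length - j := by simp
  by_cases hcase : c ≤ b.length - j
  · rw [if_neg (by omega)]
    have : c - (b.drop j).length = 0 := by omega
    rw [this, List.take_zero, List.append_nil]
  · rw [if_pos (by omega)]
    have h1 : (b.drop j).take c = b.drop j := List.take_of_length_le (by omega)
    have h2 : (c : Int) - (((b.drop j).take c).length : Int) = ((c - (b.length - j) : Nat) : Int) := by
      rw [hlen]; omega
    rw [h2, h1, PySem.List.slice_to_natCast, hdl]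

-- per-position agreement: A's wrap-by-append equals one slice of the doubled base
lemma pvWrap_eq (b : List Char) (cpp i : Int) (hb : b ≠ []) (hc : 0 ≤ cpp) :
    pvWrapA b cpp i = pvWrapB b cpp i := by
  obtain ⟨c, rfl⟩ : ∃ c : Nat, cpp = (c : Int) := ⟨cpp.toNat, (Int.toNat_of_nonneg hc).symm⟩
  have hn : 0 < (b.length : Int) := by
    have := List.length_pos_iff.mpr hb; exact_mod_cast this
  have h0 : 0 ≤ PySem.Int.mod (i * (c : Int)) (b.length : Int) := PySem.Int.mod_nonneg _ hn
  have h1 : PySem.Int.mod (i * (c : Int)) (b.length : Int) < (b.length : Int) := PySem.Int.mod_lt _ hn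
  obtain ⟨j, hj⟩ : ∃ j : Nat, PySem.Int.mod (i * (c : Int)) (b.length : Int) = (j : Int) :=
    ⟨_, (Int.toNat_of_nonneg h0).symm⟩
  have hjn : j < b.length := by rw [hj] at h1; exact_mod_cast h1
  simp only [pvWrapA, pvWrapB, hj]
  rw [PySem.List.slice_natCast_add, PySem.List.slice_natCast_add]
  exact pvWrap_core b j c hjn

lemma pvBase_ne_nil (base : Option String) (hbase : base ≠ some "") :
    (base.getD pvDefaultBase).toList ≠ [] := by
  cases base with
  | none => simp [pvDefaultBase]
  | some s =>
    intro hn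
    exact hbase (by simpa using congrArg some (String.toList_eq_nil_iff.mp hn))

-- B's chunk-building fold, characterised: it maps the iterated step over the start state
lemma pvFoldChunks {α : Type} (F : Int → α) (step : Int → Int) (p : Nat) (s0 : Int) :
    (List.range p).foldl (fun (st : List α × Int) _ => (st.1 ++ [F st.2], step st.2)) ([], s0)
    = ((List.range p).map (fun j => F (step^[j] s0)), step^[p] s0) := by
  induction p with
  | zero => simp
  | succ p ih =>
      rw [List.range_succ, List.foldl_append, ih, List.map_append]
      simp [Function.iterate_succ_apply']

-- the iterated start-advancing step computes (j*c) % n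
lemma pvStartIter (n c : Nat) (j : Nat) :
    (fun x => PySem.Int.mod (x + (c : Int)) (n : Int))^[j] 0 = (((j * c) % n : Nat) : Int) := by
  induction j with
  | zero =>
      simp
  | succ j ih =>
      rw [Function.iterate_succ_apply', ih]
      have : (((j * c) % n : Nat) : Int) + (c : Int) = (((j * c) % n + c : Nat) : Int) := by push_cast; ring
      rw [this, PySem.Int.mod_natCast]
      congr 1
      rw [Nat.mod_add_mod]
      ring_nf

-- the key periodicity: start offsets repeat with period n / gcd c n
lemma pvPeriod (n c i : Nat) :
    (i % (n / Nat.gcd c n) * c) % n = (i * c) % n := by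
  set g := Nat.gcd c n with hg
  set p := n / g with hp
  have hgc : g ∣ c := Nat.gcd_dvd_left c n
  have hgn : g ∣ n := Nat.gcd_dvd_right c n
  obtain ⟨c', hc'⟩ := hgc
  have hpc : p * c = n * c' := by
    rw [hp, hc', ← Nat.mul_assoc, Nat.div_mul_cancel hgn]
  have hstep : p * (i / p) * c = (i / p * c') * n := by
    rw [Nat.mul_comm p (i / p), Nat.mul_assoc, hpc]; ring
  have hi : i * c = i % p * c + (i / p * c') * n := by
    conv_lhs => rw [← Nat.mod_add_div i p]
    rw [Nat.add_mul, hstep]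
  rw [hi, Nat.add_mul_mod_self_right]

theorem create_charset_spec : Claim_equal_create_charset := by
  intro positions cpp base _ hpre
  simp only [Spec_create_charset, create_charset, create_charset_alt]
  -- A's dict build, as a map over the range
  have hfresh := PySem.Dict.items_foldl_insert_fresh (PySem.List.pyRange 0 positions 1)
    (fun a => a) (fun a => String.ofList (pvWrapA (base.getD pvDefaultBase).toList cpp a))
    PySem.Dict.empty
    (by intro a _; exact PySem.Dict.contains_empty a)
    (by simpa using PySem.List.nodup_pyRange_one 0 positions)
  simp only [] at hfresh
  rw [hfresh]
  simp only [List.nil_append, PySem.Dict.empty]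
  by_cases hpos : positions ≤ 0
  · rw [if_pos hpos, PySem.List.pyRange_one_eq_nil hpos, List.map_nil]
  · rw [if_neg hpos]
    obtain ⟨hc, hbase⟩ : 0 ≤ cpp ∧ base ≠ some "" := by
      rcases hpre with h | h
      · omega
      · exact h
    set b := (base.getD pvDefaultBase).toList with hb
    have hbne : b ≠ [] := pvBase_ne_nil base hbase
    have hn : 0 < b.length := List.length_pos_iff.mpr hbne
    obtain ⟨c, rfl⟩ : ∃ c : Nat, cpp = (c : Int) := ⟨cpp.toNat, (Int.toNat_of_nonneg hc).symm⟩
    -- the table B precomputes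
    rw [pvFoldChunks
      (fun s => String.ofList (PySem.List.slice (b ++ b) (some s) (some (s + (c : Int)))))
      (fun x => PySem.Int.mod (x + (c : Int)) (b.length : Int))]
    set g := pvGcdLoop b.length (Int.natAbs (c : Int)) with hgdef
    have hg : g = Nat.gcd c b.length := by rw [hgdef, pvGcdLoop_eq]; simp
    set p := b.length / g with hpdef
    have hppos : 0 < p := by
      rw [hpdef, hg]
      exact Nat.div_pos (Nat.le_of_dvd hn (Nat.gcd_dvd_right c b.length))
        (Nat.gcd_pos_of_pos_right c hn)
    rw [PySem.List.foldl_append_singleton_eq_map]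
    refine List.map_congr_left (fun i hi => ?_)
    have hmem := (PySem.List.mem_pyRange_one).mp hi
    obtain ⟨i₀, rfl⟩ : ∃ i₀ : Nat, i = (i₀ : Int) := ⟨i.toNat, (Int.toNat_of_nonneg hmem.1).symm⟩
    refine Prod.ext rfl ?_
    -- evaluate the table lookup
    have hmodi : PySem.Int.mod (i₀ : Int) (p : Int) = ((i₀ % p : Nat) : Int) :=
      PySem.Int.mod_natCast i₀ p
    have hlt : i₀ % p < p := Nat.mod_lt _ hppos
    have hget :
        PySem.List.pyGet?
          ((List.range p).map (fun j =>
            String.ofList (PySem.List.slice (b ++ b)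
              (some ((fun x => PySem.Int.mod (x + (c : Int)) (b.length : Int))^[j] 0))
              (some ((fun x => PySem.Int.mod (x + (c : Int)) (b.length : Int))^[j] 0 + (c : Int))))))
          (PySem.Int.mod (i₀ : Int) (p : Int))
        = some (String.ofList (PySem.List.slice (b ++ b)
            (some ((fun x => PySem.Int.mod (x + (c : Int)) (b.length : Int))^[i₀ % p] 0))
            (some ((fun x => PySem.Int.mod (x + (c : Int)) (b.length : Int))^[i₀ % p] 0 + (c : Int))))) := by
      rw [hmodi, PySem.List.pyGet?_natCast, List.getElem?_map, List.getElem?_range hlt]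
      rfl
    simp only [hget, Option.getD_some]
    -- identify both sides via the wrap lemmas
    rw [pvWrap_eq b (c : Int) (i₀ : Int) hbne (by positivity), pvStartIter b.length c]
    simp only [pvWrapB]
    have hstart : PySem.Int.mod ((i₀ : Int) * (c : Int)) (b.length : Int)
        = (((i₀ % p * c) % b.length : Nat) : Int) := by
      have : (i₀ : Int) * (c : Int) = ((i₀ * c : Nat) : Int) := by push_cast; ring
      rw [this, PySem.Int.mod_natCast]
      congr 1
      rw [hpdef, hg]
      exact (pvPeriod b.length c i₀).symm
    rw [hstart]
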